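-- pv_equiv track=rewrite | github.com/kshitij1010/practice | interview/python/algo/geeksforgeeks/stringNarray/ex7_largest_subarr_with_cont_elems.py | subarr_cont_elems
-- ===== SOURCE A (Python) =====
-- def subarr_cont_elems(arr):
--     if len(arr) == 0 or arr is None:
--         return
--
--     ans = 0
--     for i in range(len(arr)-1):
--         mn = arr[i]
--         mx = arr[i]
--         for j in range(i+1, len(arr)):
--             mn = min(mn, arr[j])
--             mx = max(mx, arr[j])
--
--             if (mx-mn) == (j-i):
--                 ans = max(ans, j-i+1)
--
--     return ans
-- ===== SOURCE B (Python) =====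
-- def subarr_cont_elems(arr):
--     if len(arr) == 0:
--         return None
--     ans = 0
--     for i in range(len(arr) - 1):
--         for j in range(i + 1, len(arr)):
--             window = arr[i:j + 1]
--             if max(window) - min(window) == j - i:
--                 ans = max(ans, j - i + 1)
--     return ans
-- ===== Notes on version B (the rewrite author's own statement) =====
-- stated objective: alternative
-- what changed: B drops A's incrementally maintained running min/max state and instead rescans each window arr[i:j+1] with the built-in max/min per pair, a stateless repeated-scanning strategy.
import Mathlib
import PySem

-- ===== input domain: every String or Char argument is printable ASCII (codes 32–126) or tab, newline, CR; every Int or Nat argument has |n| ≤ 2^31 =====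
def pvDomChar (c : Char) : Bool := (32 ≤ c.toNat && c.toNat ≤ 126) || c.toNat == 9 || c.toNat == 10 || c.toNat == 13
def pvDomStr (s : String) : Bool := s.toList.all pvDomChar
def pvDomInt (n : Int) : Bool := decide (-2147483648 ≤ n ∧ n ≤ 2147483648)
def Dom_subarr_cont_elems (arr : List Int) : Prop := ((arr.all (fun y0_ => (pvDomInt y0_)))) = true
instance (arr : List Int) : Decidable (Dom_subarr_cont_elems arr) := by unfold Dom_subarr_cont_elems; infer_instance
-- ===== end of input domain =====

-- B replaces A's incrementally maintained running min/max with a stateless per-pair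
-- rescan of the window arr[i:j+1] via built-in max/min (alternative decomposition, not faster).

-- ===== PORT A =====
-- inner-loop body of A: state (mn, mx, ans), updated at index j
def pvStepA (arr : List Int) (i : Int) (s : Int × Int × Int) (j : Int) : Int × Int × Int :=
  let mn := min s.1 (PySem.List.pyGetD arr j 0)
  let mx := max s.2.1 (PySem.List.pyGetD arr j 0)
  (mn, mx, if mx - mn = j - i then max s.2.2 (j - i + 1) else s.2.2)

def subarr_cont_elems (arr : List Int) : Option Int :=
  if arr.length = 0 then none
  else
    some ((PySem.List.pyRange 0 ((arr.length : Int) - 1) 1).foldl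
      (fun ans i =>
        let mn := PySem.List.pyGetD arr i 0
        let mx := PySem.List.pyGetD arr i 0
        ((PySem.List.pyRange (i + 1) (arr.length : Int) 1).foldl (pvStepA arr i) (mn, mx, ans)).2.2)
      0)

-- ===== PORT B =====
-- inner-loop body of B: rescan the window arr[i:j+1]
def pvStepB (arr : List Int) (i : Int) (ans : Int) (j : Int) : Int :=
  let w := PySem.List.slice arr (some i) (some (j + 1))
  match PySem.List.max? w (fun y => y), PySem.List.min? w (fun y => y) with
  | some mx, some mn => if mx - mn = j - i then max ans (j - i + 1) else ans
  | _, _ => ans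

def subarr_cont_elems_alt (arr : List Int) : Option Int :=
  if arr.length = 0 then none
  else
    some ((PySem.List.pyRange 0 ((arr.length : Int) - 1) 1).foldl
      (fun ans i =>
        (PySem.List.pyRange (i + 1) (arr.length : Int) 1).foldl (pvStepB arr i) ans)
      0)

-- ===== PRECONDITION & SPEC =====
def Spec_subarr_cont_elems (arr : List Int) (out : Option Int) : Prop := out = subarr_cont_elems_alt arr
instance (arr : List Int) (out : Option Int) : Decidable (Spec_subarr_cont_elems arr out) := by unfold Spec_subarr_cont_elems; infer_instance

-- ===== CLAIM (what is proved, stated in full; the proofs are below) =====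
def Claim_equal_subarr_cont_elems : Prop := ∀ (arr : List Int), Dom_subarr_cont_elems arr → Spec_subarr_cont_elems arr (subarr_cont_elems arr)

-- ===== LEMMAS AND PROOFS =====

-- min/max of a nonempty list as Python's running fold (head seed)
def pvMinL : List Int → Int
  | [] => 0
  | x :: t => t.foldl min x

def pvMaxL : List Int → Int
  | [] => 0
  | x :: t => t.foldl max x

theorem pvMin?_eq (l : List Int) (h : l ≠ []) :
    PySem.List.min? l (fun y => y) = some (pvMinL l) := by
  cases l with
  | nil => exact absurd rfl h
  | cons x t => simp [PySem.List.min?_id_cons, pvMinL]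

theorem pvMax?_eq (l : List Int) (h : l ≠ []) :
    PySem.List.max? l (fun y => y) = some (pvMaxL l) := by
  cases l with
  | nil => exact absurd rfl h
  | cons x t => simp [PySem.List.max?_id_cons, pvMaxL]

theorem pvMinL_append (l : List Int) (h : l ≠ []) (y : Int) :
    pvMinL (l ++ [y]) = min (pvMinL l) y := by
  cases l with
  | nil => exact absurd rfl h
  | cons x t => simp [pvMinL, List.foldl_append]

theorem pvMaxL_append (l : List Int) (h : l ≠ []) (y : Int) :
    pvMaxL (l ++ [y]) = max (pvMaxL l) y := by
  cases l with
  | nil => exact absurd rfl h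
  | cons x t => simp [pvMaxL, List.foldl_append]

-- the window arr[i:k] as drop/take, and its one-step extension
theorem pvSeg_succ (arr : List Int) (i k : Nat) (hik : i ≤ k) (hk : k < arr.length) :
    (arr.drop i).take (k + 1 - i) = (arr.drop i).take (k - i) ++ [arr[k]] := by
  have h1 : k + 1 - i = (k - i) + 1 := by omega
  rw [h1, List.take_add_one, List.getElem?_drop]
  have h2 : i + (k - i) = k := by omega
  rw [h2, List.getElem?_eq_getElem hk]
  rfl

theorem pvSeg_ne_nil (arr : List Int) (i k : Nat) (hik : i < k) (hk : k ≤ arr.length) :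
    (arr.drop i).take (k - i) ≠ [] := by
  have : ((arr.drop i).take (k - i)).length = min (k - i) (arr.length - i) := by
    simp
  intro h
  rw [h] at this
  simp at this
  omega

-- inner-loop invariant: with (mn, mx) = (min, max) of arr[i:k], A's remaining inner fold
-- computes the same ans as B's remaining inner fold
theorem pvInner (arr : List Int) (i : Nat) :
    ∀ (m k : Nat), i < k → k + m = arr.length → ∀ ans : Int,
      ((PySem.List.pyRange (k : Int) (arr.length : Int) 1).foldl (pvStepA arr (i : Int))
          (pvMinL ((arr.drop i).take (k - i)), pvMaxL ((arr.drop i).take (k - i)), ans)).2.2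
        = (PySem.List.pyRange (k : Int) (arr.length : Int) 1).foldl (pvStepB arr (i : Int)) ans := by
  intro m
  induction m with
  | zero =>
    intro k hik hk ans
    have : (k : Int) = (arr.length : Int) := by omega
    rw [this, PySem.List.pyRange_one_eq_nil le_rfl]
    rfl
  | succ m ih =>
    intro k hik hk ans
    have hklt : k < arr.length := by omega
    have hcons : PySem.List.pyRange (k : Int) (arr.length : Int) 1
        = (k : Int) :: PySem.List.pyRange ((k : Int) + 1) (arr.length : Int) 1 := by
      exact PySem.List.pyRange_one_cons (by exact_mod_cast hklt)
    have hcast : (k : Int) + 1 = ((k + 1 : Nat) : Int) := by push_cast; ring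
    have hget : PySem.List.pyGetD arr (k : Int) 0 = arr[k] := by
      rw [PySem.List.pyGetD_natCast, List.getD_eq_getElem arr 0 hklt]
    have hseg : (arr.drop i).take (k + 1 - i) = (arr.drop i).take (k - i) ++ [arr[k]] :=
      pvSeg_succ arr i k (by omega) hklt
    have hne : (arr.drop i).take (k - i) ≠ [] := pvSeg_ne_nil arr i k hik (by omega)
    have hne' : (arr.drop i).take (k + 1 - i) ≠ [] := pvSeg_ne_nil arr i (k + 1) (by omega) (by omega)
    -- B's window at j = k is arr[i : k+1]
    have hslice : PySem.List.slice arr (some (i : Int)) (some ((k : Int) + 1))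
        = (arr.drop i).take (k + 1 - i) := by
      rw [hcast, PySem.List.slice_natCast]
    rw [hcons, List.foldl_cons, List.foldl_cons]
    -- evaluate the two step functions at j = k
    have hstepA : pvStepA arr (i : Int)
        (pvMinL ((arr.drop i).take (k - i)), pvMaxL ((arr.drop i).take (k - i)), ans) (k : Int)
        = (pvMinL ((arr.drop i).take (k + 1 - i)), pvMaxL ((arr.drop i).take (k + 1 - i)),
            if pvMaxL ((arr.drop i).take (k + 1 - i)) - pvMinL ((arr.drop i).take (k + 1 - i))
                = (k : Int) - (i : Int) then max ans ((k : Int) - (i : Int) + 1) else ans) := by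
      simp only [pvStepA, hget, hseg, pvMinL_append _ hne, pvMaxL_append _ hne]
    have hstepB : pvStepB arr (i : Int) ans (k : Int)
        = (if pvMaxL ((arr.drop i).take (k + 1 - i)) - pvMinL ((arr.drop i).take (k + 1 - i))
              = (k : Int) - (i : Int) then max ans ((k : Int) - (i : Int) + 1) else ans) := by
      simp only [pvStepB, hslice, pvMin?_eq _ hne', pvMax?_eq _ hne']
    rw [hstepA, hstepB, hcast]
    exact ih (k + 1) (by omega) (by omega) _

-- per outer index i, A's body equals B's body
theorem pvOuterBody (arr : List Int) (i : Int) (hi0 : 0 ≤ i) (hi1 : i < (arr.length : Int) - 1) :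
    ∀ ans : Int,
      ((PySem.List.pyRange (i + 1) (arr.length : Int) 1).foldl (pvStepA arr i)
          (PySem.List.pyGetD arr i 0, PySem.List.pyGetD arr i 0, ans)).2.2
        = (PySem.List.pyRange (i + 1) (arr.length : Int) 1).foldl (pvStepB arr i) ans := by
  intro ans
  obtain ⟨n, rfl⟩ := Int.eq_ofNat_of_zero_le hi0
  have hn : n < arr.length := by omega
  have hget : PySem.List.pyGetD arr (n : Int) 0 = arr[n] := by
    rw [PySem.List.pyGetD_natCast, List.getD_eq_getElem arr 0 hn]
  have hseg1 : (arr.drop n).take ((n + 1) - n) = [arr[n]] := by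
    have : (n + 1) - n = 1 := by omega
    rw [this, List.drop_eq_getElem_cons hn]
    rfl
  have hcast : (n : Int) + 1 = ((n + 1 : Nat) : Int) := by push_cast; ring
  have := pvInner arr n (arr.length - (n + 1)) (n + 1) (by omega) (by omega) ans
  rw [hseg1] at this
  have h1 : pvMinL [arr[n]] = arr[n] := by simp [pvMinL]
  have h2 : pvMaxL [arr[n]] = arr[n] := by simp [pvMaxL]
  rw [h1, h2] at this
  rw [hget, hcast]
  exact this

-- ===== VERDICT (by name: the statement is the Claim_ definition above) =====
theorem subarr_cont_elems_spec : Claim_equal_subarr_cont_elems := by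
  intro arr _
  unfold Spec_subarr_cont_elems subarr_cont_elems subarr_cont_elems_alt
  by_cases h : arr.length = 0
  · simp [h]
  · simp only [h, if_false]
    congr 1
    apply PySem.List.foldl_congr_mem
    intro ans i hi
    rw [PySem.List.mem_pyRange_one] at hi
    exact pvOuterBody arr i hi.1 hi.2 ans
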